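-- pv_equiv track=rewrite | github.com/xn4224nx/Advent-of-Code-Py | 2016/Day 07/main.py | is_ssl_isp
-- ===== SOURCE A (Python) =====
-- def is_palindrome(text_str: str, abba: bool) -> bool:
--     """Check if a string is a palindrome."""
--
--     # Make sure that the interior characters are different
--     if abba and text_str[0] == text_str[1]:
--         return False
--
--     # Loop over the first part of the string
--     for i in range(0, len(text_str)//2):
--
--         # check if the ith char == the -i character
--         if text_str[i] != text_str[len(text_str)-1-i]:
--             return False
--     else:
--         return True
--
-- def str_generator(text_str: str, window: int):
--     """Generator to give the window size of the `text_str`."""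
--
--     for i in range(len(text_str) - window + 1):
--         yield text_str[i:i+window]
--
-- def is_ssl_isp(ip_tuple: tuple) -> bool:
--     """Is an ISP SSL compliant."""
--
--     # Find all the ABA
--     aba_arr = []
--     for string in ip_tuple[0]:
--         for sub_str in str_generator(string, 3):
--             if is_palindrome(sub_str, True):
--                 aba_arr.append(sub_str)
--     else:
--         # If the array is empty it's not compliant
--         if not aba_arr:
--             return False
--
--     # Find all the BAB
--     bab_arr = []
--     for string in ip_tuple[1]:
--         for sub_str in str_generator(string, 3):
--             if is_palindrome(sub_str, True):
--                 bab_arr.append(sub_str)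
--     else:
--         # If the array is empty it's not compliant
--         if not bab_arr:
--             return False
--
--     # Flip the found ABA strings
--     for i in range(len(aba_arr)):
--         aba_arr[i] = aba_arr[i][1] + aba_arr[i][0] + aba_arr[i][1]
--
--     # See if the ABA and BAB have common elements
--     for str_1 in aba_arr:
--         if str_1 in bab_arr:
--             return True
--     else:
--         return False
-- ===== SOURCE B (Python) =====
-- def is_ssl_isp(ip_tuple: tuple) -> bool:
--     """Is an ISP SSL compliant."""
--     # Candidate alphabet: characters occurring both in a supernet and a hypernet.
--     sup_chars = {c for s in ip_tuple[0] for c in s}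
--     hyp_chars = {c for s in ip_tuple[1] for c in s}
--     common = sup_chars & hyp_chars
--     # Generate-and-test: for each candidate pair, substring-search the two patterns.
--     return any(
--         x != y
--         and any(x + y + x in s for s in ip_tuple[0])
--         and any(y + x + y in s for s in ip_tuple[1])
--         for x in common
--         for y in common
--     )
-- ===== Notes on version B (the rewrite author's own statement) =====
-- stated objective: alternative
-- what changed: B never scans length-3 windows or collects ABA/BAB substrings at all: it computes the common alphabet of supernets and hypernets and then, for each candidate character pair (x,y), tests the literal patterns x+y+x and y+x+y by substring search, replacing A's collect/collect/flip/cross-scan pipeline by generate-and-test over patterns.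
-- outside the precondition, e.g. on is_ssl_isp((['abc'],)): A returns False, B raises IndexError
import Mathlib
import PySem

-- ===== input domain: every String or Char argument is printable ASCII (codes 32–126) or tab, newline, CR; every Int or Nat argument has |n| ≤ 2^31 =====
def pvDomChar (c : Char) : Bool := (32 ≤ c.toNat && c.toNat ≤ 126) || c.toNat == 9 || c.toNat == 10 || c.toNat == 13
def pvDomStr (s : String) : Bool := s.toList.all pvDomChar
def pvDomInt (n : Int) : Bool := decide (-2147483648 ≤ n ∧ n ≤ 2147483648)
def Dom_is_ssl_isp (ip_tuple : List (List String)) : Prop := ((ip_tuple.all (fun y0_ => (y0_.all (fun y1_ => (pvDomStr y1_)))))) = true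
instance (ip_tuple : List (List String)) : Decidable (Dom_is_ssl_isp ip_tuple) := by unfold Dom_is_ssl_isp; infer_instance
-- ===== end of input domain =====

-- B drops A's window scans and substring collections entirely: it computes the common alphabet of
-- supernets and hypernets and substring-searches the candidate patterns x+y+x / y+x+y directly.

-- ===== PORT A =====
def is_palindrome (text_str : String) (abba : Bool) : Bool :=
  let l := text_str.toList
  -- text_str[0]/text_str[1] raise IndexError in Python for len < 2; in this program the
  -- argument is always a length-3 window, so the Option comparison below is exact there
  if abba && (PySem.List.pyGet? l 0 == PySem.List.pyGet? l 1) then false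
  else
    (PySem.List.pyRange 0 (PySem.Int.floordiv (l.length : Int) 2) 1).all
      (fun i => PySem.List.pyGet? l i == PySem.List.pyGet? l ((l.length : Int) - 1 - i))

def str_generator (text_str : String) (window : Int) : List String :=
  (PySem.List.pyRange 0 ((text_str.toList.length : Int) - window + 1) 1).map
    (fun i => String.ofList (PySem.List.slice text_str.toList (some i) (some (i + window))))

-- the in-place flip of one entry: aba_arr[i][1] + aba_arr[i][0] + aba_arr[i][1]
def flip3 (w : String) : String :=
  match PySem.List.pyGet? w.toList 1, PySem.List.pyGet? w.toList 0 with
  | some b, some a => String.ofList [b, a, b]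
  | _, _ => w  -- unreached: every element of aba_arr has length 3 (Python would raise IndexError)

def is_ssl_isp (ip_tuple : List (List String)) : Bool :=
  match PySem.List.pyGet? ip_tuple 0 with
  | none => false  -- IndexError in Python: outside Pre_
  | some sup =>
    let aba_arr := sup.foldl (fun acc s =>
      (str_generator s 3).foldl
        (fun acc w => if is_palindrome w true then acc ++ [w] else acc) acc) []
    if aba_arr.isEmpty then false
    else
      match PySem.List.pyGet? ip_tuple 1 with
      | none => false  -- IndexError in Python: outside Pre_
      | some hyp =>
        let bab_arr := hyp.foldl (fun acc s =>
          (str_generator s 3).foldl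
            (fun acc w => if is_palindrome w true then acc ++ [w] else acc) acc) []
        if bab_arr.isEmpty then false
        else
          -- the elementwise in-place flip loop over aba_arr, as the fold it performs
          let flipped := aba_arr.map flip3
          flipped.any (fun w => bab_arr.contains w)

-- ===== PORT B =====
def is_ssl_isp_alt (ip_tuple : List (List String)) : Bool :=
  match PySem.List.pyGet? ip_tuple 0, PySem.List.pyGet? ip_tuple 1 with
  | some sup, some hyp =>
    -- {c for s in ip_tuple[0] for c in s} and the same over ip_tuple[1]
    let supChars : PySem.Set Char :=
      sup.foldl (fun st s => s.toList.foldl (fun st c => PySem.Set.add st c) st) PySem.Set.empty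
    let hypChars : PySem.Set Char :=
      hyp.foldl (fun st s => s.toList.foldl (fun st c => PySem.Set.add st c) st) PySem.Set.empty
    let common : PySem.Set Char := PySem.Set.inter supChars hypChars
    -- any(... for x in common for y in common): order-independent (a Bool any over the set)
    common.any (fun x => common.any (fun y =>
      x != y
      && sup.any (fun s => PySem.Str.isIn (String.ofList [x, y, x]) s)
      && hyp.any (fun s => PySem.Str.isIn (String.ofList [y, x, y]) s)))
  | _, _ => false  -- IndexError in Python: outside Pre_

-- ===== PRECONDITION & SPEC =====
-- Pre_ requires both the supernet and the hypernet list to be present (length ≥ 2): on shorter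
-- inputs B raises IndexError at ip_tuple[1] (as A does, except that A happens to return False on a
-- 1-element tuple whose single list contains no ABA, because its empty-check precedes ip_tuple[1]).
def Pre_is_ssl_isp (ip_tuple : List (List String)) : Prop := 2 ≤ ip_tuple.length
instance (ip_tuple : List (List String)) : Decidable (Pre_is_ssl_isp ip_tuple) := by
  unfold Pre_is_ssl_isp; infer_instance

def pvWitness_is_ssl_isp : List (List String) := [["aba"], ["bab"]]

def Spec_is_ssl_isp (ip_tuple : List (List String)) (out : Bool) : Prop := out = is_ssl_isp_alt ip_tuple
instance (ip_tuple : List (List String)) (out : Bool) : Decidable (Spec_is_ssl_isp ip_tuple out) := by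
  unfold Spec_is_ssl_isp; infer_instance

-- ===== CLAIM (what is proved, stated in full; the proofs are below) =====
def Claim_equal_is_ssl_isp : Prop := ∀ (ip_tuple : List (List String)), Dom_is_ssl_isp ip_tuple → Pre_is_ssl_isp ip_tuple → Spec_is_ssl_isp ip_tuple (is_ssl_isp ip_tuple)

-- ===== LEMMAS AND PROOFS =====

-- the length-3 windows of l, as character triples: zip(l, l[1:], l[2:])
def triples (l : List Char) : List (Char × Char × Char) := l.zip (l.tail.zip l.tail.tail)

-- "the strings of L contain the ABA window x y x"
def HasABA (L : List String) (x y : Char) : Prop := ∃ s ∈ L, (x, y, x) ∈ triples s.toList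

-- "some ABA of sup is some BAB of hyp flipped": the common meaning of both programs
def SslMatch (sup hyp : List String) : Prop := ∃ x y, x ≠ y ∧ HasABA sup x y ∧ HasABA hyp y x

theorem ofList_inj (l1 l2 : List Char) : String.ofList l1 = String.ofList l2 ↔ l1 = l2 := by
  constructor
  · intro h; have := congrArg String.toList h; simpa using this
  · exact congrArg _

theorem pal3 (a b c : Char) :
    is_palindrome (String.ofList [a,b,c]) true = (!(a == b) && a == c) := by
  have h : (String.ofList [a,b,c]).toList = [a,b,c] := by simp
  rw [is_palindrome, h]
  norm_num [PySem.List.pyGet?, PySem.List.pyIdx?, PySem.List.pyRange]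
  by_cases hab : a = b <;> by_cases hcb : c = b <;> simp [hab, hcb]

theorem flip3_mk (a b c : Char) :
    flip3 (String.ofList [a,b,c]) = String.ofList [b,a,b] := by
  have h : (String.ofList [a,b,c]).toList = [a,b,c] := by simp
  rw [flip3, h]
  simp [PySem.List.pyGet?, PySem.List.pyIdx?]

theorem slice_cons_shift (a : Char) (t : List Char) (k : Nat) :
    PySem.List.slice (a::t) (some (1+(k:Int))) (some (1+(k:Int)+3)) =
    PySem.List.slice t (some (k:Int)) (some ((k:Int)+3)) := by
  rw [show (1+(k:Int)) = ((k+1 : Nat) : Int) by push_cast; ring]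
  rw [show (((k+1:Nat):Int)+3) = ((k+4 : Nat) : Int) by push_cast; ring]
  rw [show ((k:Int)+3) = ((k+3 : Nat) : Int) by push_cast; ring]
  rw [PySem.List.slice_natCast, PySem.List.slice_natCast]
  simp

theorem win_char (l : List Char) :
    (PySem.List.pyRange 0 ((l.length:Int) - 3 + 1) 1).map
      (fun i => PySem.List.slice l (some i) (some (i+3)))
    = (triples l).map (fun t => [t.1, t.2.1, t.2.2]) := by
  induction l with
  | nil =>
    rw [show (([]:List Char).length:Int) - 3 + 1 = -2 by norm_num]
    rw [PySem.List.pyRange_one_eq_nil (by norm_num)]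
    simp [triples]
  | cons a t ih =>
    rcases t with _ | ⟨b, t⟩
    · rw [show (([a]:List Char).length:Int) - 3 + 1 = -1 by norm_num]
      rw [PySem.List.pyRange_one_eq_nil (by norm_num)]
      simp [triples]
    rcases t with _ | ⟨c, u⟩
    · rw [show (([a,b]:List Char).length:Int) - 3 + 1 = 0 by norm_num]
      rw [PySem.List.pyRange_one_eq_nil (by norm_num)]
      simp [triples]
    have hlen : (((a::b::c::u).length:Int) - 3 + 1) = (u.length : Int) + 1 := by
      simp; ring
    rw [hlen, PySem.List.pyRange_one_cons (by positivity)]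
    have htr : triples (a::b::c::u) = (a,b,c) :: triples (b::c::u) := by
      simp [triples]
    rw [htr, List.map_cons, List.map_cons]
    refine congrArg₂ _ ?_ ?_
    · rw [PySem.List.slice_zero_start]
      rw [show (0:Int)+3 = ((3:Nat):Int) by norm_num]
      rw [PySem.List.slice_to_natCast]
      simp
    · have hlen2 : ((b::c::u).length:Int) - 3 + 1 = (u.length : Int) := by simp; ring
      rw [hlen2] at ih
      rw [PySem.List.pyRange_one] at ih ⊢
      rw [show ((u.length:Int) + 1 - (0+1)).toNat = u.length by omega]
      rw [show ((u.length:Int) - 0).toNat = u.length by omega] at ih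
      rw [List.map_map] at ih ⊢
      rw [← ih]
      refine List.map_congr_left ?_
      intro k _
      simp only [Function.comp, zero_add]
      exact slice_cons_shift a (b::c::u) k

theorem windows_eq (s : String) :
    str_generator s 3 =
    (triples s.toList).map (fun t => String.ofList [t.1, t.2.1, t.2.2]) := by
  have h := congrArg (List.map String.ofList) (win_char s.toList)
  rw [List.map_map, List.map_map] at h
  simpa [str_generator, Function.comp] using h

-- A's nested collection loop, as the flatMap of filtered window lists
theorem collect_eq (L : List String) :
    L.foldl (fun acc s =>
      (str_generator s 3).foldl
        (fun acc w => if is_palindrome w true then acc ++ [w] else acc) acc) []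
    = L.flatMap (fun s => (str_generator s 3).filter (fun w => is_palindrome w true)) := by
  have h : (fun (acc : List String) s =>
      (str_generator s 3).foldl
        (fun acc w => if is_palindrome w true then acc ++ [w] else acc) acc)
      = (fun acc s => acc ++ (str_generator s 3).filter (fun w => is_palindrome w true)) := by
    funext acc s
    exact PySem.List.foldl_append_if_eq_filter _ _ _
  rw [h, PySem.List.foldl_append_eq_flatMap]
  simp

theorem mem_collect (L : List String) (w : String) :
    (w ∈ L.flatMap (fun s => (str_generator s 3).filter (fun v => is_palindrome v true)))
    ↔ ∃ x y, x ≠ y ∧ HasABA L x y ∧ w = String.ofList [x, y, x] := by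
  simp only [List.mem_flatMap, List.mem_filter]
  constructor
  · rintro ⟨s, hs, hw, hpal⟩
    rw [windows_eq] at hw
    obtain ⟨⟨x, y, z⟩, ht, rfl⟩ := List.mem_map.mp hw
    rw [pal3] at hpal
    simp only [Bool.and_eq_true, Bool.not_eq_true', beq_eq_false_iff_ne, beq_iff_eq] at hpal
    obtain ⟨hxy, rfl⟩ := hpal
    exact ⟨x, y, hxy, ⟨s, hs, ht⟩, rfl⟩
  · rintro ⟨x, y, hxy, ⟨s, hs, ht⟩, rfl⟩
    refine ⟨s, hs, ?_, ?_⟩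
    · rw [windows_eq]
      exact List.mem_map.mpr ⟨(x, y, x), ht, rfl⟩
    · rw [pal3]; simp [hxy]

theorem charA (sup hyp : List String) (rest : List (List String)) :
    is_ssl_isp (sup :: hyp :: rest) = true ↔ SslMatch sup hyp := by
  rw [is_ssl_isp]
  rw [PySem.List.pyGet?_zero_cons]
  rw [show PySem.List.pyGet? (sup :: hyp :: rest) 1 = some hyp from by
    rw [show (1:Int) = ((1:Nat):Int) by norm_num, PySem.List.pyGet?_natCast]; rfl]
  simp only [collect_eq]
  by_cases ha :
      (sup.flatMap (fun s => (str_generator s 3).filter (fun w => is_palindrome w true))) = []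
  · rw [ha]
    simp only [List.isEmpty_nil, if_true]
    constructor
    · intro h; exact absurd h (by simp)
    · rintro ⟨x, y, hxy, hsup, _⟩
      have : String.ofList [x,y,x] ∈ ([] : List String) := by
        rw [← ha]; exact (mem_collect sup _).mpr ⟨x, y, hxy, hsup, rfl⟩
      simp at this
  · rw [if_neg (by simpa [List.isEmpty_iff] using ha)]
    by_cases hb :
        (hyp.flatMap (fun s => (str_generator s 3).filter (fun w => is_palindrome w true))) = []
    · rw [hb]
      simp only [List.isEmpty_nil, if_true]
      constructor
      · intro h; exact absurd h (by simp)
      · rintro ⟨x, y, hxy, _, hhyp⟩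
        have : String.ofList [y,x,y] ∈ ([] : List String) := by
          rw [← hb]; exact (mem_collect hyp _).mpr ⟨y, x, (Ne.symm hxy), hhyp, rfl⟩
        simp at this
    · rw [if_neg (by simpa [List.isEmpty_iff] using hb)]
      rw [List.any_eq_true]
      constructor
      · rintro ⟨w, hw, hc⟩
        obtain ⟨v, hv, rfl⟩ := List.mem_map.mp hw
        obtain ⟨x, y, hxy, hsup, rfl⟩ := (mem_collect sup v).mp hv
        rw [flip3_mk] at hc
        have hmem : String.ofList [y,x,y] ∈
            hyp.flatMap (fun s => (str_generator s 3).filter (fun w => is_palindrome w true)) := by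
          simpa using hc
        obtain ⟨x', y', hxy', hhyp, heq⟩ := (mem_collect hyp _).mp hmem
        rw [ofList_inj] at heq
        obtain ⟨h1, h2, -⟩ : y = x' ∧ x = y' ∧ y = x' := by simpa using heq
        rw [← h1, ← h2] at hhyp
        exact ⟨x, y, hxy, hsup, hhyp⟩
      · rintro ⟨x, y, hxy, hsup, hhyp⟩
        refine ⟨flip3 (String.ofList [x,y,x]), List.mem_map.mpr
          ⟨String.ofList [x,y,x], (mem_collect sup _).mpr ⟨x, y, hxy, hsup, rfl⟩, rfl⟩, ?_⟩
        rw [flip3_mk]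
        have : String.ofList [y,x,y] ∈
            hyp.flatMap (fun s => (str_generator s 3).filter (fun w => is_palindrome w true)) :=
          (mem_collect hyp _).mpr ⟨y, x, Ne.symm hxy, hhyp, rfl⟩
        simpa using this

-- B-side lemmas ----------------------------------------------------------------

-- membership in the window list of character triples is infix containment of the pattern
theorem mem_triples_iff_infix (a b c : Char) (l : List Char) :
    (a, b, c) ∈ triples l ↔ [a, b, c] <:+: l := by
  induction l with
  | nil => simp [triples]
  | cons h t ih =>
    rw [List.infix_cons_iff]
    rcases t with _ | ⟨h2, t⟩
    · simp [triples]
    rcases t with _ | ⟨h3, t⟩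
    · have hni : ¬ [a,b,c] <:+: [h2] := fun hinf => by have := hinf.length_le; simp at this
      have hnp : ¬ [a,b,c] <+: h :: [h2] := fun hpre => by have := hpre.length_le; simp at this
      simp [triples, hni, hnp]
    have htr : triples (h::h2::h3::t) = (h,h2,h3) :: triples (h2::h3::t) := by
      simp [triples]
    rw [htr, List.mem_cons, ih]
    constructor
    · rintro (he | hi)
      · exact Or.inl (by injection he with e1 e2; injection e2 with e2 e3; subst e1 e2 e3; simp)
      · exact Or.inr hi
    · rintro (hp | hi)
      · rw [List.cons_prefix_cons] at hp
        obtain ⟨rfl, hp⟩ := hp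
        rw [List.cons_prefix_cons] at hp
        obtain ⟨rfl, hp⟩ := hp
        rw [List.cons_prefix_cons] at hp
        obtain ⟨rfl, -⟩ := hp
        exact Or.inl rfl
      · exact Or.inr hi

theorem chars_of_triples (a b c : Char) (l : List Char) (h : (a, b, c) ∈ triples l) :
    a ∈ l ∧ b ∈ l := by
  obtain ⟨p, s, rfl⟩ := (mem_triples_iff_infix a b c l).mp h
  constructor <;> simp

-- the char-collection double fold, characterised by membership
theorem mem_charsFold (L : List String) (st : PySem.Set Char) (c : Char) :
    (c ∈ L.foldl (fun st s => s.toList.foldl (fun st c => PySem.Set.add st c) st) st)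
    ↔ c ∈ st ∨ ∃ s ∈ L, c ∈ s.toList := by
  induction L generalizing st with
  | nil => simp
  | cons s L ih =>
    rw [List.foldl_cons, ih]
    have hin : (c ∈ s.toList.foldl (fun st c => PySem.Set.add st c) st)
        ↔ c ∈ st ∨ c ∈ s.toList := by
      have := PySem.Set.mem_foldl_add (l := s.toList) (s := st) (f := fun c => c) (y := c)
      simpa using this
    rw [hin]
    constructor
    · rintro ((h | h) | ⟨s', hs', hc⟩)
      · exact Or.inl h
      · exact Or.inr ⟨s, by simp, h⟩
      · exact Or.inr ⟨s', by simp [hs'], hc⟩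
    · rintro (h | ⟨s', hs', hc⟩)
      · exact Or.inl (Or.inl h)
      · rcases List.mem_cons.mp hs' with rfl | hs'
        · exact Or.inl (Or.inr hc)
        · exact Or.inr ⟨s', hs', hc⟩

theorem charB (sup hyp : List String) (rest : List (List String)) :
    is_ssl_isp_alt (sup :: hyp :: rest) = true ↔ SslMatch sup hyp := by
  rw [is_ssl_isp_alt]
  rw [PySem.List.pyGet?_zero_cons]
  rw [show PySem.List.pyGet? (sup :: hyp :: rest) 1 = some hyp from by
    rw [show (1:Int) = ((1:Nat):Int) by norm_num, PySem.List.pyGet?_natCast]; rfl]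
  simp only [List.any_eq_true, Bool.and_eq_true, bne_iff_ne]
  constructor
  · rintro ⟨x, -, y, -, ⟨hxy, ⟨s, hs, hin1⟩⟩, t, ht, hin2⟩
    rw [PySem.Str.isIn_iff_infix] at hin1 hin2
    simp only [String.toList_ofList] at hin1 hin2
    exact ⟨x, y, hxy,
      ⟨s, hs, (mem_triples_iff_infix x y x s.toList).mpr hin1⟩,
      ⟨t, ht, (mem_triples_iff_infix y x y t.toList).mpr hin2⟩⟩
  · rintro ⟨x, y, hxy, ⟨s, hs, hts⟩, t, ht, htt⟩
    have hxs : x ∈ s.toList ∧ y ∈ s.toList := chars_of_triples x y x s.toList hts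
    have hxt : y ∈ t.toList ∧ x ∈ t.toList := chars_of_triples y x y t.toList htt
    have hxc : ∀ c, c ∈ s.toList → c ∈ t.toList →
        c ∈ PySem.Set.inter
          (sup.foldl (fun st s => s.toList.foldl (fun st c => PySem.Set.add st c) st)
            PySem.Set.empty)
          (hyp.foldl (fun st s => s.toList.foldl (fun st c => PySem.Set.add st c) st)
            PySem.Set.empty) := by
      intro c hc1 hc2
      rw [PySem.Set.mem_inter]
      exact ⟨(mem_charsFold sup PySem.Set.empty c).mpr (Or.inr ⟨s, hs, hc1⟩),
             (mem_charsFold hyp PySem.Set.empty c).mpr (Or.inr ⟨t, ht, hc2⟩)⟩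
    refine ⟨x, hxc x hxs.1 hxt.2, y, hxc y hxs.2 hxt.1, ⟨hxy, ⟨s, hs, ?_⟩⟩, t, ht, ?_⟩
    · rw [PySem.Str.isIn_iff_infix]
      simpa using (mem_triples_iff_infix x y x s.toList).mp hts
    · rw [PySem.Str.isIn_iff_infix]
      simpa using (mem_triples_iff_infix y x y t.toList).mp htt

-- ===== VERDICT (by name: the statement is the Claim_ definition above) =====
theorem is_ssl_isp_spec : Claim_equal_is_ssl_isp := by
  intro ip_tuple _ hpre
  unfold Spec_is_ssl_isp
  rcases ip_tuple with _ | ⟨sup, _ | ⟨hyp, rest⟩⟩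
  · exact absurd hpre (by simp [Pre_is_ssl_isp])
  · exact absurd hpre (by simp [Pre_is_ssl_isp])
  · have h := (charA sup hyp rest).trans (charB sup hyp rest).symm
    cases hA : is_ssl_isp (sup :: hyp :: rest) <;>
      cases hB : is_ssl_isp_alt (sup :: hyp :: rest) <;> simp_all
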